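-- pv_equiv track=rewrite | github.com/euntaek419/EunTaek-TIL | 프로그래머스/unrated/181893. 배열 조각하기/배열 조각하기.py | solution
-- ===== SOURCE A (Python) =====
-- def solution(arr, query):
--
--     num = 0
--
--     for i in query:
--         if(num % 2 == 0):
--             arr = arr[:i+1]
--         else:
--             arr = arr[i:]
--
--         num += 1
--
--     return arr
-- ===== SOURCE B (Python) =====
-- def solution(arr, query):
--     # Track the surviving window [lo, hi) of the original arr; slice once at the end.
--     lo, hi = 0, len(arr)
--     for num, i in enumerate(query):
--         n = hi - lo
--         if num % 2 == 0:
--             j = i + 1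
--             if j < 0:
--                 j += n
--             j = 0 if j < 0 else (n if j > n else j)
--             hi = lo + j
--         else:
--             j = i
--             if j < 0:
--                 j += n
--             j = 0 if j < 0 else (n if j > n else j)
--             lo = lo + j
--     return arr[lo:hi]
-- ===== Notes on version B (the rewrite author's own statement) =====
-- stated objective: alternative
-- what changed: B tracks only the lo/hi offsets of the surviving window over the original list and performs a single final slice, instead of materialising a new list at every query as A does.
import Mathlib
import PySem

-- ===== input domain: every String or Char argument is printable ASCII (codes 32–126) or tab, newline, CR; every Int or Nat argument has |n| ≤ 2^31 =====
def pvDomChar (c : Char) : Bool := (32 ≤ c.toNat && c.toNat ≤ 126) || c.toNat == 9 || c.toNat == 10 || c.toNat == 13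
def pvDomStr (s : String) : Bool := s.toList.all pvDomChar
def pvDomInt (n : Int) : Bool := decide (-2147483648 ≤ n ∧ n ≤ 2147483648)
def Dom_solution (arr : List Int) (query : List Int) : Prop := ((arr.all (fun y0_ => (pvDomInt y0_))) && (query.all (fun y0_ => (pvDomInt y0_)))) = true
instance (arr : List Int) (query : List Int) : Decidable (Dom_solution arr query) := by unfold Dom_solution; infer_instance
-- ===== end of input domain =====

-- B replaces A's per-query list re-slicing by tracking lo/hi window offsets and one final slice.

-- ===== PORT A =====
def solution (arr : List Int) (query : List Int) : List Int :=
  (query.foldl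
    (fun (s : List Int × Int) i =>
      (if PySem.Int.mod s.2 2 = 0 then PySem.List.slice s.1 none (some (i + 1))
       else PySem.List.slice s.1 (some i) none,
       s.2 + 1))
    (arr, 0)).1

-- ===== PORT B =====
-- Source B's in-loop bound normalisation: add len if negative, then clamp to [0, n]
def clampB (n : Nat) (j0 : Int) : Nat :=
  let j := if j0 < 0 then j0 + n else j0
  if j < 0 then 0 else if (n : Int) < j then n else j.toNat

def solution_alt (arr : List Int) (query : List Int) : List Int :=
  let s := query.foldl
    (fun (s : Nat × Nat × Int) i =>
      let n := s.2.1 - s.1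
      if PySem.Int.mod s.2.2 2 = 0 then (s.1, s.1 + clampB n (i + 1), s.2.2 + 1)
      else (s.1 + clampB n i, s.2.1, s.2.2 + 1))
    (0, arr.length, 0)
  PySem.List.slice arr (some (s.1 : Int)) (some (s.2.1 : Int))

-- ===== PRECONDITION & SPEC =====
def Spec_solution (arr : List Int) (query : List Int) (out : List Int) : Prop := out = solution_alt arr query
instance (arr : List Int) (query : List Int) (out : List Int) : Decidable (Spec_solution arr query out) := by unfold Spec_solution; infer_instance

-- ===== CLAIM (what is proved, stated in full; the proofs are below) =====
def Claim_equal_solution : Prop := ∀ (arr : List Int) (query : List Int), Dom_solution arr query → Spec_solution arr query (solution arr query)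

-- ===== LEMMAS AND PROOFS =====

lemma clampB_eq_clampIdx (n : Nat) (i : Int) : clampB n i = PySem.List.clampIdx n i := by
  simp only [clampB, PySem.List.clampIdx]
  split_ifs <;> omega

lemma slice_none_some {α : Type} (xs : List α) (b : Int) :
    PySem.List.slice xs none (some b) = xs.take (PySem.List.clampIdx xs.length b) := by
  simp [PySem.List.slice, PySem.List.clampIdx]

lemma clampB_le (n : Nat) (i : Int) : clampB n i ≤ n := by
  simp only [clampB]; split_ifs <;> omega

lemma loop_eq (query : List Int) : ∀ (x : List Int) (lo hi : Nat) (num : Int),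
    lo ≤ hi → hi ≤ x.length →
    (query.foldl
      (fun (s : List Int × Int) i =>
        (if PySem.Int.mod s.2 2 = 0 then PySem.List.slice s.1 none (some (i + 1))
         else PySem.List.slice s.1 (some i) none,
         s.2 + 1))
      ((x.drop lo).take (hi - lo), num)).1
    = (let s := query.foldl
          (fun (s : Nat × Nat × Int) i =>
            let n := s.2.1 - s.1
            if PySem.Int.mod s.2.2 2 = 0 then (s.1, s.1 + clampB n (i + 1), s.2.2 + 1)
            else (s.1 + clampB n i, s.2.1, s.2.2 + 1))
          (lo, hi, num)
       (x.drop s.1).take (s.2.1 - s.1)) := by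
  induction query with
  | nil => intro x lo hi num h1 h2; simp
  | cons i qs ih =>
    intro x lo hi num h1 h2
    have hlen : ((x.drop lo).take (hi - lo)).length = hi - lo := by
      simp [List.length_take, List.length_drop]; omega
    simp only [List.foldl_cons]
    by_cases hp : PySem.Int.mod num 2 = 0
    · -- even step: take
      have hc : clampB (hi - lo) (i + 1) ≤ hi - lo := clampB_le _ _
      have hstep : PySem.List.slice ((x.drop lo).take (hi - lo)) none (some (i + 1))
          = (x.drop lo).take (clampB (hi - lo) (i + 1)) := by
        rw [slice_none_some, hlen, ← clampB_eq_clampIdx, List.take_take]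
        congr 1; omega
      have hp' : (2 : Int) ∣ num := (PySem.Int.mod_eq_zero_iff_dvd num 2).1 hp
      have := ih x lo (lo + clampB (hi - lo) (i + 1)) (num + 1) (by omega) (by omega)
      simpa [hp', hstep, Nat.add_sub_cancel_left] using this
    · -- odd step: drop
      have hc : clampB (hi - lo) i ≤ hi - lo := clampB_le _ _
      have hstep : PySem.List.slice ((x.drop lo).take (hi - lo)) (some i) none
          = (x.drop (lo + clampB (hi - lo) i)).take (hi - (lo + clampB (hi - lo) i)) := by
        rw [PySem.List.slice_some_none, hlen, ← clampB_eq_clampIdx,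
            List.drop_take, List.drop_drop]
        congr 1
        all_goals omega
      have hp' : ¬ (2 : Int) ∣ num := fun h => hp ((PySem.Int.mod_eq_zero_iff_dvd num 2).2 h)
      have := ih x (lo + clampB (hi - lo) i) hi (num + 1) (by omega) h2
      simpa [hp', hstep] using this

-- ===== VERDICT (by name: the statement is the Claim_ definition above) =====
theorem solution_spec : Claim_equal_solution := by
  intro arr query _
  unfold Spec_solution solution solution_alt
  have h := loop_eq query arr 0 arr.length 0 (Nat.zero_le _) le_rfl
  simp only [List.drop_zero, Nat.sub_zero, List.take_length] at h
  rw [h]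
  simp [PySem.List.slice_natCast]
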